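-- pv_equiv track=rewrite | github.com/krawieck/game_of_life_to_video | src/renderer.py | assume_framerate
-- ===== SOURCE A (Python) =====
-- def assume_framerate(frames_count: int):
--     framerate_stages = [
--         # threshold, framerate
--         (5, 2),
--         (30, 5),
--         (100, 10),
--         (500, 15),
--     ]
--     fallback_framerate = 20
--
--     for threshold, framerate in framerate_stages:
--         if frames_count < threshold:
--             return framerate
--     return fallback_framerate
-- ===== SOURCE B (Python) =====
-- import bisect
--
-- _THRESHOLDS = [5, 30, 100, 500]
-- _FRAMERATES = [2, 5, 10, 15, 20]  # last entry is the fallback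
--
-- def assume_framerate(frames_count: int):
--     return _FRAMERATES[bisect.bisect_right(_THRESHOLDS, frames_count)]
-- ===== Notes on version B (the rewrite author's own statement) =====
-- stated objective: idiomatic
-- what changed: Replaces the explicit loop over (threshold, framerate) pairs with bisect_right into a sorted thresholds table indexed into a parallel framerates list (fallback appended as last entry).
import Mathlib
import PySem

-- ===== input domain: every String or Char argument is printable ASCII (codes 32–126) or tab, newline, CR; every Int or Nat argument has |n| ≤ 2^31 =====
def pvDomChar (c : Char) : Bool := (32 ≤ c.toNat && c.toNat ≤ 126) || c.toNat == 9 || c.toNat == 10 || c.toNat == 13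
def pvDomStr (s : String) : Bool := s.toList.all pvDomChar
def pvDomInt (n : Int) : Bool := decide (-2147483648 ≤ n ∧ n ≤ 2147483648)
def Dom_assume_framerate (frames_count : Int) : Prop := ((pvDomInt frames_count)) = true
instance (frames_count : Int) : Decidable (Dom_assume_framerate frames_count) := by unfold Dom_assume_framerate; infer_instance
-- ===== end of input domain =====

-- B replaces A's explicit threshold loop by a bisect_right table lookup (idiomatic; same cost).


-- ===== PORT A =====
-- loop over (threshold, framerate) stages with early return, as in A
def afStages : List (Int × Int) := [(5, 2), (30, 5), (100, 10), (500, 15)]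

def afLoop (stages : List (Int × Int)) (frames_count : Int) : Int :=
  match stages with
  | [] => 20  -- fallback_framerate
  | (threshold, framerate) :: rest =>
      if frames_count < threshold then framerate else afLoop rest frames_count

def assume_framerate (frames_count : Int) : Int :=
  afLoop afStages frames_count


-- ===== PORT B =====
-- table lookup: bisect_right into sorted thresholds, parallel framerates list
def afThresholds : List Int := [5, 30, 100, 500]
def afFramerates : List Int := [2, 5, 10, 15, 20]

def assume_framerate_alt (frames_count : Int) : Int :=
  afFramerates.getD (PySem.List.bisectRight afThresholds frames_count) 20


-- ===== PRECONDITION & SPEC =====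
def Spec_assume_framerate (frames_count : Int) (out : Int) : Prop := out = assume_framerate_alt frames_count
instance (frames_count : Int) (out : Int) : Decidable (Spec_assume_framerate frames_count out) := by unfold Spec_assume_framerate; infer_instance

-- ===== CLAIM (what is proved, stated in full; the proofs are below) =====
def Claim_equal_assume_framerate : Prop := ∀ (frames_count : Int), Dom_assume_framerate frames_count → Spec_assume_framerate frames_count (assume_framerate frames_count)

-- ===== LEMMAS AND PROOFS =====

-- ===== VERDICT (by name: the statement is the Claim_ definition above) =====
theorem assume_framerate_spec : Claim_equal_assume_framerate := by
  intro x _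
  unfold Spec_assume_framerate assume_framerate assume_framerate_alt
  simp only [afStages, afThresholds, afFramerates, afLoop,
    PySem.List.bisectRight]
  norm_num
  split_ifs <;> simp_all [PySem.List.bisectRightLoop] <;> split_ifs <;> first | decide | omega
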